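-- pv_equiv track=rewrite | github.com/in-rolls/parse_unsearchable_rolls | scripts/gujarat/main.py | extract_detail_section
-- ===== SOURCE A (Python) =====
-- def split_data(data):
--     seps = [":",">","-","."]
--
--     for s in seps:
--         if s in data:
--             break
--
--     data = data.split(s)
--     data = [ i for i in data if i.strip()!='']
--     if len(data)>1:
--         data = data[1].strip()
--         return data
--     else:
--         data = ""
--
-- def extract_detail_section(text):
--     keywords = ['Village','Ward No','Police','Tehsil','District','Pin']
--     found_keywords = ["","","","","",""]
--     for idx,keyword in enumerate(keywords):
--         for t in text:
--             if keyword in t: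
--                 found_keywords[idx] = split_data(t)
--                 break
--     return found_keywords
-- ===== SOURCE B (Python) =====
-- def split_data(data):
--     for s in (":", ">", "-"):
--         if s in data:
--             break
--     else:
--         s = "."
--     parts = [p for p in data.split(s) if p.strip()]
--     return parts[1].strip() if len(parts) > 1 else None
--
-- def extract_detail_section(text):
--     # slots: (False, keyword) while still searching, (True, value) once filled
--     slots = [(False, kw) for kw in ['Village','Ward No','Police','Tehsil','District','Pin']]
--     for t in text:
--         slots = [(True, split_data(t)) if (not f and v in t) else (f, v)
--                  for (f, v) in slots]
--     return [v if f else "" for (f, v) in slots]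
-- ===== Notes on version B (the rewrite author's own statement) =====
-- stated objective: alternative
-- what changed: A scans the whole text once per keyword (keyword-outer loop with break); B makes a single forward pass over the lines, maintaining per-slot state (pending keyword vs. filled value) and finalizing unfilled slots to "" at the end.
import Mathlib
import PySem

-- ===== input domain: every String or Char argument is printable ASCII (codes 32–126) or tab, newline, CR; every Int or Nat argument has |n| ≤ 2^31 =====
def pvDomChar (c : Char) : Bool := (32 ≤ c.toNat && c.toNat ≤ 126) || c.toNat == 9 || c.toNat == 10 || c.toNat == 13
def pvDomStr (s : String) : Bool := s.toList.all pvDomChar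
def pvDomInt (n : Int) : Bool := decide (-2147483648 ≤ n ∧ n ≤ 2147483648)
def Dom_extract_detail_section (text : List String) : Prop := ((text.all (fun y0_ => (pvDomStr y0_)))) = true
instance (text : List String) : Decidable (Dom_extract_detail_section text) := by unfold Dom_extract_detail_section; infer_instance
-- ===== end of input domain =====

-- B re-decomposes A's keyword-outer repeated scans as one line-outer pass with per-slot state; return value only.

-- ===== PORT A =====
-- split_data: leftover loop variable s = first separator contained in data, else "." (the last iterated)
def pvSplitDataA (data : String) : Option String :=
  let s := (([":", ">", "-", "."].find? (fun sp => PySem.Str.isIn sp data)).getD ".")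
  let parts := ((PySem.Str.split? data s).getD []).filter (fun i => PySem.Str.strip i != "")
  if parts.length > 1 then some (PySem.Str.strip (parts.getD 1 "")) else none

-- per keyword, the inner 'for t in text: … break' is the first line containing the keyword
def extract_detail_section (text : List String) : List (Option String) :=
  ["Village", "Ward No", "Police", "Tehsil", "District", "Pin"].map (fun kw =>
    match text.find? (fun t => PySem.Str.isIn kw t) with
    | some t => pvSplitDataA t
    | none => some "")

-- ===== PORT B =====
def pvSplitDataB (data : String) : Option String :=
  let s := (([":", ">", "-"].find? (fun sp => PySem.Str.isIn sp data)).getD ".")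
  let parts := ((PySem.Str.split? data s).getD []).filter (fun p => PySem.Str.strip p != "")
  if parts.length > 1 then some (PySem.Str.strip (parts.getD 1 "")) else none

-- a slot is (False, keyword) = Sum.inl keyword while searching, (True, value) = Sum.inr value once filled
def pvStepB (t : String) (slots : List (String ⊕ Option String)) : List (String ⊕ Option String) :=
  slots.map (fun s => match s with
    | .inl kw => if PySem.Str.isIn kw t then .inr (pvSplitDataB t) else .inl kw
    | .inr v => .inr v)

def extract_detail_section_alt (text : List String) : List (Option String) :=
  (text.foldl (fun slots t => pvStepB t slots)
      (["Village", "Ward No", "Police", "Tehsil", "District", "Pin"].map Sum.inl)).map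
    (fun s => match s with
      | .inl _ => some ""
      | .inr v => v)

-- ===== PRECONDITION & SPEC =====
def Spec_extract_detail_section (text : List String) (out : List (Option String)) : Prop := out = extract_detail_section_alt text
instance (text : List String) (out : List (Option String)) : Decidable (Spec_extract_detail_section text out) := by unfold Spec_extract_detail_section; infer_instance

-- ===== CLAIM (what is proved, stated in full; the proofs are below) =====
def Claim_equal_extract_detail_section : Prop := ∀ (text : List String), Dom_extract_detail_section text → Spec_extract_detail_section text (extract_detail_section text)

-- ===== LEMMAS AND PROOFS =====

-- the two split_data ports pick the same separator, hence agree
theorem pvSplitData_eq (data : String) : pvSplitDataA data = pvSplitDataB data := by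
  unfold pvSplitDataA pvSplitDataB
  have hsep : (([":", ">", "-", "."].find? (fun sp => PySem.Str.isIn sp data)).getD ".")
      = (([":", ">", "-"].find? (fun sp => PySem.Str.isIn sp data)).getD ".") := by
    cases h1 : PySem.Chars.isIn [':'] data.toList <;>
      cases h2 : PySem.Chars.isIn ['>'] data.toList <;>
        cases h3 : PySem.Chars.isIn ['-'] data.toList <;>
          cases h4 : PySem.Chars.isIn ['.'] data.toList <;>
            simp [List.find?, h1, h2, h3, h4]
  rw [hsep]

-- per-slot meaning of the remaining text
def pvSlotVal (text : List String) (s : String ⊕ Option String) : Option String :=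
  match s with
  | .inl kw =>
      match text.find? (fun t => PySem.Str.isIn kw t) with
      | some t => pvSplitDataB t
      | none => some ""
  | .inr v => v

theorem pvFoldl_stepB (text : List String) (slots : List (String ⊕ Option String)) :
    (text.foldl (fun sl t => pvStepB t sl) slots).map
        (fun s => match s with | .inl _ => some "" | .inr v => v)
      = slots.map (pvSlotVal text) := by
  induction text generalizing slots with
  | nil =>
      apply List.map_congr_left
      intro s _
      cases s <;> simp [pvSlotVal, List.find?]
  | cons t rest ih =>
      simp only [List.foldl_cons]
      rw [ih]
      unfold pvStepB
      rw [List.map_map]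
      apply List.map_congr_left
      intro s _
      cases s with
      | inr v => simp [pvSlotVal]
      | inl kw =>
          by_cases h : PySem.Chars.isIn kw.toList t.toList = true <;>
            simp [pvSlotVal, List.find?, h]

-- ===== VERDICT (by name: the statement is the Claim_ definition above) =====
theorem extract_detail_section_spec : Claim_equal_extract_detail_section := by
  intro text _
  unfold Spec_extract_detail_section extract_detail_section extract_detail_section_alt
  rw [pvFoldl_stepB, List.map_map]
  apply List.map_congr_left
  intro kw _
  simp [pvSlotVal, pvSplitData_eq]
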